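-- pv_equiv track=rewrite | github.com/ahmedsghaier/platforme_football | base.py | classify_position
-- ===== SOURCE A (Python) =====
-- def classify_position(position):
--     """Classifie les positions en catégories principales avec gestion des doubles postes"""
--     if not position:
--         return 'Unknown'
--
--     position = position.upper()
--
--     # Définir l'ordre de priorité (du plus spécialisé au plus général)
--     priority_order = ['Gardien', 'Attaquant', 'Milieu', 'Defenseur']
--
--     # Dictionnaire des catégories avec leurs codes
--     position_categories = {
--         'Gardien': ['GK'],
--         'Defenseur': ['CB', 'RB', 'LB', 'DF', 'WB'],
--         'Milieu': ['CM', 'CDM', 'CAM', 'RM', 'LM', 'MF', 'DM', 'AM'],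
--         'Attaquant': ['ST', 'CF', 'LW', 'RW', 'FW']
--     }
--
--     # Séparer les positions multiples (par virgule ou autre séparateur)
--     positions = [pos.strip() for pos in position.replace(',', '/').replace('-', '/').split('/')]
--
--     # Identifier toutes les catégories possibles
--     found_categories = []
--     for pos in positions:
--         for category, codes in position_categories.items():
--             if any(code in pos for code in codes):
--                 if category not in found_categories:
--                     found_categories.append(category)
--
--     # Si aucune catégorie trouvée
--     if not found_categories:
--         return 'Unknown'
--
--     # Si une seule catégorie trouvée
--     if len(found_categories) == 1:
--         return found_categories[0]
--
--     # Si plusieurs catégories, appliquer la priorité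
--     for category in priority_order:
--         if category in found_categories:
--             return category
--
--     return found_categories[0]  # Fallback
-- ===== SOURCE B (Python) =====
-- CATEGORIES = [
--     ('Gardien', ['GK']),
--     ('Attaquant', ['ST', 'CF', 'LW', 'RW', 'FW']),
--     ('Milieu', ['CM', 'CDM', 'CAM', 'RM', 'LM', 'MF', 'DM', 'AM']),
--     ('Defenseur', ['CB', 'RB', 'LB', 'DF', 'WB']),
-- ]
--
--
-- def classify_position(position):
--     if not position:
--         return 'Unknown'
--     tokens = [t.strip() for t in position.upper().replace(',', '/').replace('-', '/').split('/')]
--     for category, codes in CATEGORIES: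
--         if any(code in tok for tok in tokens for code in codes):
--             return category
--     return 'Unknown'
-- ===== Notes on version B (the rewrite author's own statement) =====
-- stated objective: simpler
-- what changed: B drops A's found_categories accumulation (nested token/category loop with dedup) and its three-way postprocessing (empty / singleton / priority scan), replacing it all with one direct scan over the categories in priority order that returns the first category whose codes match any token.
import Mathlib
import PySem

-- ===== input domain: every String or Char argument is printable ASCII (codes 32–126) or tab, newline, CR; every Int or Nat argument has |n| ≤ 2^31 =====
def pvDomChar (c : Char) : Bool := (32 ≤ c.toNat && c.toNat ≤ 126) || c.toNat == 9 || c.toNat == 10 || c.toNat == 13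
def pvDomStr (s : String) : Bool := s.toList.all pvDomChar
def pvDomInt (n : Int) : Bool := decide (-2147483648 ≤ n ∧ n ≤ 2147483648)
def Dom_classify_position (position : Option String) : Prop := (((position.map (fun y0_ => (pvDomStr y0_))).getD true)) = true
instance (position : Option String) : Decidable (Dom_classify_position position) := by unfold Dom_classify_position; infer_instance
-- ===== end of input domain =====

-- B replaces A's found-categories accumulation + dedup + three-way postprocessing by a single
-- direct scan over the categories in priority order (objective: simpler).

-- ===== PORT A =====
-- A's dict of categories, in its insertion order
def aCategories : List (String × List String) :=
  [("Gardien", ["GK"]),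
   ("Defenseur", ["CB", "RB", "LB", "DF", "WB"]),
   ("Milieu", ["CM", "CDM", "CAM", "RM", "LM", "MF", "DM", "AM"]),
   ("Attaquant", ["ST", "CF", "LW", "RW", "FW"])]

-- the nested loop building found_categories (append if not already present)
def aFoundAux (positions : List String) (found0 : List String) : List String :=
  positions.foldl (fun found pos =>
    aCategories.foldl (fun found cp =>
      if cp.2.any (fun code => PySem.Str.isIn code pos) then
        (if found.contains cp.1 then found else found ++ [cp.1])
      else found) found) found0

-- the 'for category in priority_order: if category in found: return category' loop
def aPriority (prio : List String) (found : List String) : Option String :=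
  match prio with
  | [] => none
  | c :: rest => if found.contains c then some c else aPriority rest found

def classify_position (position : Option String) : String :=
  match position with
  | none => "Unknown"
  | some s =>
    if s == "" then "Unknown"
    else
      let positions := ((PySem.Str.split?
        (PySem.Str.replace (PySem.Str.replace (PySem.Str.upper s) "," "/") "-" "/") "/").getD []).map
        PySem.Str.strip
      let found := aFoundAux positions []
      if found.isEmpty then "Unknown"
      else if found.length == 1 then (PySem.List.pyGet? found 0).getD "Unknown"
      else
        match aPriority ["Gardien", "Attaquant", "Milieu", "Defenseur"] found with
        | some c => c
        | none => (PySem.List.pyGet? found 0).getD "Unknown"   -- Python's unreachable fallback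

-- ===== PORT B =====
-- B's category list, already in priority order
def bCategories : List (String × List String) :=
  [("Gardien", ["GK"]),
   ("Attaquant", ["ST", "CF", "LW", "RW", "FW"]),
   ("Milieu", ["CM", "CDM", "CAM", "RM", "LM", "MF", "DM", "AM"]),
   ("Defenseur", ["CB", "RB", "LB", "DF", "WB"])]

-- 'for category, codes in CATEGORIES: if any(...): return category; return Unknown'
def bScan (cats : List (String × List String)) (tokens : List String) : String :=
  match cats with
  | [] => "Unknown"
  | (cat, codes) :: rest =>
    if tokens.any (fun tok => codes.any (fun code => PySem.Str.isIn code tok)) then cat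
    else bScan rest tokens

def classify_position_alt (position : Option String) : String :=
  match position with
  | none => "Unknown"
  | some s =>
    if s == "" then "Unknown"
    else
      bScan bCategories (((PySem.Str.split?
        (PySem.Str.replace (PySem.Str.replace (PySem.Str.upper s) "," "/") "-" "/") "/").getD []).map
        PySem.Str.strip)

-- ===== PRECONDITION & SPEC =====
def Spec_classify_position (position : Option String) (out : String) : Prop := out = classify_position_alt position
instance (position : Option String) (out : String) : Decidable (Spec_classify_position position out) := by unfold Spec_classify_position; infer_instance

-- ===== CLAIM (what is proved, stated in full; the proofs are below) =====
def Claim_equal_classify_position : Prop := ∀ (position : Option String), Dom_classify_position position → Spec_classify_position position (classify_position position)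

-- ===== LEMMAS AND PROOFS =====

-- category-match predicate for a code list over the token list
def mCat (codes : List String) (tokens : List String) : Bool :=
  tokens.any (fun tok => codes.any (fun code => PySem.Str.isIn code tok))

-- A's postprocessing of found_categories, as a function (definitionally the tail of classify_position)
def aPost (found : List String) : String :=
  if found.isEmpty then "Unknown"
  else if found.length == 1 then (PySem.List.pyGet? found 0).getD "Unknown"
  else
    match aPriority ["Gardien", "Attaquant", "Milieu", "Defenseur"] found with
    | some c => c
    | none => (PySem.List.pyGet? found 0).getD "Unknown"

theorem mem_addStep (l : List String) (x c : String) (b : Bool) :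
    (c ∈ (if b = true then (if l.contains x then l else l ++ [x]) else l)) ↔
      c ∈ l ∨ (b = true ∧ c = x) := by
  split_ifs with hb hc
  · have : x ∈ l := by simpa using hc
    constructor
    · intro h; exact Or.inl h
    · rintro (h | ⟨_, rfl⟩); exact h; exact this
  · simp [hb, eq_comm]
  · simp [hb]

theorem mCat_cons (codes : List String) (p : String) (ps : List String) :
    mCat codes (p :: ps) = (mCat codes [p] || mCat codes ps) := by
  simp [mCat]

theorem mem_innerFold (p : String) (acc : List String) (c : String) :
    c ∈ (aCategories.foldl (fun found cp =>
          if cp.2.any (fun code => PySem.Str.isIn code p) then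
            (if found.contains cp.1 then found else found ++ [cp.1])
          else found) acc) ↔
      c ∈ acc ∨
      (c = "Gardien" ∧ mCat ["GK"] [p] = true) ∨
      (c = "Defenseur" ∧ mCat ["CB", "RB", "LB", "DF", "WB"] [p] = true) ∨
      (c = "Milieu" ∧ mCat ["CM", "CDM", "CAM", "RM", "LM", "MF", "DM", "AM"] [p] = true) ∨
      (c = "Attaquant" ∧ mCat ["ST", "CF", "LW", "RW", "FW"] [p] = true) := by
  simp only [aCategories, List.foldl_cons, List.foldl_nil]
  simp only [mem_addStep]
  simp only [mCat, List.any_cons, List.any_nil, Bool.or_false]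
  tauto

theorem mem_aFoundAux (positions : List String) (found0 : List String) (c : String) :
    c ∈ aFoundAux positions found0 ↔
      c ∈ found0 ∨
      (c = "Gardien" ∧ mCat ["GK"] positions = true) ∨
      (c = "Defenseur" ∧ mCat ["CB", "RB", "LB", "DF", "WB"] positions = true) ∨
      (c = "Milieu" ∧ mCat ["CM", "CDM", "CAM", "RM", "LM", "MF", "DM", "AM"] positions = true) ∨
      (c = "Attaquant" ∧ mCat ["ST", "CF", "LW", "RW", "FW"] positions = true) := by
  induction positions generalizing found0 with
  | nil => simp [aFoundAux, mCat]
  | cons p ps ih =>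
    have hstep : aFoundAux (p :: ps) found0 =
        aFoundAux ps (aCategories.foldl (fun found cp =>
          if cp.2.any (fun code => PySem.Str.isIn code p) then
            (if found.contains cp.1 then found else found ++ [cp.1])
          else found) found0) := rfl
    rw [hstep, ih, mem_innerFold]
    rw [mCat_cons ["GK"] p ps, mCat_cons ["CB", "RB", "LB", "DF", "WB"] p ps,
        mCat_cons ["CM", "CDM", "CAM", "RM", "LM", "MF", "DM", "AM"] p ps,
        mCat_cons ["ST", "CF", "LW", "RW", "FW"] p ps]
    simp only [Bool.or_eq_true, and_or_left]
    constructor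
    · rintro ((h | h | h | h | h) | h | h | h | h)
      · exact Or.inl h
      · exact Or.inr (Or.inl (Or.inl h))
      · exact Or.inr (Or.inr (Or.inl (Or.inl h)))
      · exact Or.inr (Or.inr (Or.inr (Or.inl (Or.inl h))))
      · exact Or.inr (Or.inr (Or.inr (Or.inr (Or.inl h))))
      · exact Or.inr (Or.inl (Or.inr h))
      · exact Or.inr (Or.inr (Or.inl (Or.inr h)))
      · exact Or.inr (Or.inr (Or.inr (Or.inl (Or.inr h))))
      · exact Or.inr (Or.inr (Or.inr (Or.inr (Or.inr h))))
    · rintro (h | (h | h) | (h | h) | (h | h) | (h | h))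
      · exact Or.inl (Or.inl h)
      · exact Or.inl (Or.inr (Or.inl h))
      · exact Or.inr (Or.inl h)
      · exact Or.inl (Or.inr (Or.inr (Or.inl h)))
      · exact Or.inr (Or.inr (Or.inl h))
      · exact Or.inl (Or.inr (Or.inr (Or.inr (Or.inl h))))
      · exact Or.inr (Or.inr (Or.inr (Or.inl h)))
      · exact Or.inl (Or.inr (Or.inr (Or.inr (Or.inr h))))
      · exact Or.inr (Or.inr (Or.inr (Or.inr h)))

theorem aPost_eq_scan (found : List String)
    (h : ∀ c ∈ found, c = "Gardien" ∨ c = "Defenseur" ∨ c = "Milieu" ∨ c = "Attaquant") :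
    aPost found =
      (if "Gardien" ∈ found then "Gardien"
       else if "Attaquant" ∈ found then "Attaquant"
       else if "Milieu" ∈ found then "Milieu"
       else if "Defenseur" ∈ found then "Defenseur"
       else "Unknown") := by
  match found with
  | [] => simp [aPost]
  | [c] =>
    rcases h c (by simp) with rfl | rfl | rfl | rfl <;> decide
  | c1 :: c2 :: rest =>
    have hlen : ((c1 :: c2 :: rest).length == 1) = false := by
      simp [List.length_cons]
    simp only [aPost, List.isEmpty_cons, hlen, Bool.false_eq_true, if_false, aPriority]
    have hc : ∀ (x : String), ((c1 :: c2 :: rest).contains x) = decide (x ∈ c1 :: c2 :: rest) := by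
      intro x; simp
    simp only [hc]
    by_cases h1 : "Gardien" ∈ c1 :: c2 :: rest
    · simp [h1]
    · by_cases h2 : "Attaquant" ∈ c1 :: c2 :: rest
      · simp [h1, h2]
      · by_cases h3 : "Milieu" ∈ c1 :: c2 :: rest
        · simp [h1, h2, h3]
        · by_cases h4 : "Defenseur" ∈ c1 :: c2 :: rest
          · simp [h1, h2, h3, h4]
          · exfalso
            rcases h c1 (by simp) with rfl | rfl | rfl | rfl
            · exact h1 (by simp)
            · exact h4 (by simp)
            · exact h3 (by simp)
            · exact h2 (by simp)

theorem main_lemma (tokens : List String) :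
    aPost (aFoundAux tokens []) = bScan bCategories tokens := by
  rw [aPost_eq_scan (aFoundAux tokens [])
      (fun c hc => by
        rcases (mem_aFoundAux tokens [] c).mp hc with h | ⟨rfl, _⟩ | ⟨rfl, _⟩ | ⟨rfl, _⟩ | ⟨rfl, _⟩
        · simp at h
        · exact Or.inl rfl
        · exact Or.inr (Or.inl rfl)
        · exact Or.inr (Or.inr (Or.inl rfl))
        · exact Or.inr (Or.inr (Or.inr rfl)))]
  have hm : ∀ x : String, (x ∈ aFoundAux tokens []) ↔
      ((x = "Gardien" ∧ mCat ["GK"] tokens = true) ∨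
       (x = "Defenseur" ∧ mCat ["CB", "RB", "LB", "DF", "WB"] tokens = true) ∨
       (x = "Milieu" ∧ mCat ["CM", "CDM", "CAM", "RM", "LM", "MF", "DM", "AM"] tokens = true) ∨
       (x = "Attaquant" ∧ mCat ["ST", "CF", "LW", "RW", "FW"] tokens = true)) := by
    intro x; rw [mem_aFoundAux]; simp
  simp only [hm, bScan, bCategories]
  simp [mCat]

-- ===== VERDICT (by name: the statement is the Claim_ definition above) =====
theorem classify_position_spec : Claim_equal_classify_position := by
  intro position _
  unfold Spec_classify_position classify_position classify_position_alt
  cases position with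
  | none => rfl
  | some s =>
    by_cases h : s == ""
    · simp [h]
    · simp only [h, Bool.false_eq_true, if_false]
      exact main_lemma _
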